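-- pv_equiv track=rewrite | github.com/AdityaNarayanmcw/Smart-Assistant | model_compare.py | normalize_sentence
-- ===== SOURCE A (Python) =====
-- from typing import List, Dict, Optional
-- from collections import defaultdict
--
-- intent_map = defaultdict(lambda: "command")
--
-- devices = ["camera", "lights", "music", "shutters"]
--
-- locations = ["attic", "backyard", "basement", "bathroom", "cellar", "kitchen", "library",
--              "living room", "none", "outside", "restroom", "toilet", "dining room"]
--
-- nlp = None
--
-- def normalize_sentence(sentence: str, category: Optional[str] = None, subcategory: Optional[str] = None, action: Optional[str] = None) -> Dict[str, str]:
--     if nlp: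
--         doc = nlp(sentence.lower())
--     else:
--         doc = sentence.lower().split()
--
--     intent = "unknown"
--     device = category.lower() if category else "none"
--     location = subcategory.lower() if subcategory else "none"
--     action_slot = action.lower() if action else "none"
--
--     if action_slot in intent_map:
--         intent = intent_map[action_slot]
--     else:
--         command_verbs = ["turn", "activate", "play", "stop", "adjust"]
--         query_verbs = ["check", "query", "status"]
--         for token in doc if nlp else doc:
--             token_text = token.text if nlp else token
--             if token_text in command_verbs:
--                 intent = "command"
--             elif token_text in query_verbs:
--                 intent = "query"
--
--     if not category:
--         for token in doc if nlp else doc: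
--             token_text = token.text if nlp else token
--             if token_text in devices:
--                 device = token_text
--                 break
--     if not subcategory:
--         for token in doc if nlp else doc:
--             token_text = token.text if nlp else token
--             if token_text in locations:
--                 location = token_text
--                 break
--
--     return {
--         "intent": intent,
--         "action": action_slot,
--         "device": device,
--         "location": location
--     }
-- ===== SOURCE B (Python) =====
-- # B: single fused pass over the tokens (last-match intent, first-match device/location
-- # with found flags) instead of A's three separate scans; the always-false empty
-- # intent_map guard is dropped.
-- devices = ["camera", "lights", "music", "shutters"]
--
-- locations = ["attic", "backyard", "basement", "bathroom", "cellar", "kitchen", "library",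
--              "living room", "none", "outside", "restroom", "toilet", "dining room"]
--
-- COMMAND_VERBS = ("turn", "activate", "play", "stop", "adjust")
-- QUERY_VERBS = ("check", "query", "status")
--
-- def normalize_sentence(sentence, category=None, subcategory=None, action=None):
--     intent = "unknown"
--     device = category.lower() if category else "none"
--     location = subcategory.lower() if subcategory else "none"
--     action_slot = action.lower() if action else "none"
--     need_dev = not category
--     need_loc = not subcategory
--     dev_found = loc_found = False
--     for tok in sentence.lower().split():
--         if tok in COMMAND_VERBS:
--             intent = "command"
--         elif tok in QUERY_VERBS:
--             intent = "query"
--         if need_dev and not dev_found and tok in devices: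
--             device, dev_found = tok, True
--         if need_loc and not loc_found and tok in locations:
--             location, loc_found = tok, True
--     return {"intent": intent, "action": action_slot, "device": device, "location": location}
-- ===== Notes on version B (the rewrite author's own statement) =====
-- stated objective: simpler
-- what changed: B fuses A's three separate token scans (last-match intent fold, first-match device scan with break, first-match location scan with break) into a single pass carrying found flags, and drops the dead always-false membership test on the empty intent_map.
import Mathlib
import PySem

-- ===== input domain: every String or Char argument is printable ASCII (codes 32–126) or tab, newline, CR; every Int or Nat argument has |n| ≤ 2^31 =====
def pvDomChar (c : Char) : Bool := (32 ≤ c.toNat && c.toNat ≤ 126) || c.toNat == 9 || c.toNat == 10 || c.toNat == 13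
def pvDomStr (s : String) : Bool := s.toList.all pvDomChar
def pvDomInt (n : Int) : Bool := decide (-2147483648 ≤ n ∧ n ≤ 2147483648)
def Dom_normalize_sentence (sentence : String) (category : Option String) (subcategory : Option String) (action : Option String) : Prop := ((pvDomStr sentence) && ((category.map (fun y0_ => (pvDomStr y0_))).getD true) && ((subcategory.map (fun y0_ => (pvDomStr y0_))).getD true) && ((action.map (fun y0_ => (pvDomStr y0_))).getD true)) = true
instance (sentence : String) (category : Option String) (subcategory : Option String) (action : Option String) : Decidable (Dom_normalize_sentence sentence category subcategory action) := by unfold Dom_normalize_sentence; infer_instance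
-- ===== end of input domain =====

-- B fuses A's three token scans (last-match intent, first-match device/location) into one
-- pass with found flags and drops the always-false empty-intent_map guard; objective: simpler.

-- shared module constants of the Python module
def pv_devices : List String := ["camera", "lights", "music", "shutters"]
def pv_locations : List String := ["attic", "backyard", "basement", "bathroom", "cellar", "kitchen", "library",
  "living room", "none", "outside", "restroom", "toilet", "dining room"]
-- x.lower() if x else "none"   (Python truthiness: None and "" are falsy)
def pvLowerOr (o : Option String) : String :=
  match o with
  | some s => if s = "" then "none" else PySem.Str.lower s
  | none => "none"
-- not x  for an Optional[str]
def pvFalsy (o : Option String) : Bool :=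
  match o with
  | some s => s == ""
  | none => true

-- ===== PORT A =====
-- intent_map = defaultdict(lambda: "command") : never written to, so empty
def pv_intent_map : PySem.Dict String String := PySem.Dict.empty
-- the for-loop with break: return the first token in pool, else the current value
def pvScanFirst (pool : List String) : List String → String → String
  | [], d => d
  | t :: ts, d => if pool.contains t then t else pvScanFirst pool ts d

def normalize_sentence (sentence : String) (category : Option String) (subcategory : Option String) (action : Option String) : List (String × String) :=
  let doc := PySem.Str.split₀ (PySem.Str.lower sentence)   -- nlp is None: the else branch
  let intent := "unknown"
  let device := pvLowerOr category
  let location := pvLowerOr subcategory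
  let action_slot := pvLowerOr action
  let intent :=
    if pv_intent_map.contains action_slot then
      pv_intent_map.getD action_slot "command"   -- defaultdict lookup (key present here)
    else
      doc.foldl (fun intent token =>
        if (["turn", "activate", "play", "stop", "adjust"] : List String).contains token then "command"
        else if (["check", "query", "status"] : List String).contains token then "query"
        else intent) intent
  let device := if pvFalsy category then pvScanFirst pv_devices doc device else device
  let location := if pvFalsy subcategory then pvScanFirst pv_locations doc location else location
  [("intent", intent), ("action", action_slot), ("device", device), ("location", location)]

-- ===== PORT B =====
-- loop body of Source B: state = (intent, device, dev_found, location, loc_found)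
def pvStep (needDev needLoc : Bool) (st : String × String × Bool × String × Bool) (tok : String) : String × String × Bool × String × Bool :=
  (if (["turn", "activate", "play", "stop", "adjust"] : List String).contains tok then "command"
   else if (["check", "query", "status"] : List String).contains tok then "query"
   else st.1,
   if needDev && !st.2.2.1 && pv_devices.contains tok then tok else st.2.1,
   (needDev && !st.2.2.1 && pv_devices.contains tok) || st.2.2.1,
   if needLoc && !st.2.2.2.2 && pv_locations.contains tok then tok else st.2.2.2.1,
   (needLoc && !st.2.2.2.2 && pv_locations.contains tok) || st.2.2.2.2)

def normalize_sentence_alt (sentence : String) (category : Option String) (subcategory : Option String) (action : Option String) : List (String × String) :=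
  let device := pvLowerOr category
  let location := pvLowerOr subcategory
  let action_slot := pvLowerOr action
  let needDev := pvFalsy category
  let needLoc := pvFalsy subcategory
  let st := (PySem.Str.split₀ (PySem.Str.lower sentence)).foldl (pvStep needDev needLoc)
    ("unknown", device, false, location, false)
  [("intent", st.1), ("action", action_slot), ("device", st.2.1), ("location", st.2.2.2.1)]

-- ===== PRECONDITION & SPEC =====
def Spec_normalize_sentence (sentence : String) (category : Option String) (subcategory : Option String) (action : Option String) (out : List (String × String)) : Prop := out = normalize_sentence_alt sentence category subcategory action
instance (sentence : String) (category : Option String) (subcategory : Option String) (action : Option String) (out : List (String × String)) : Decidable (Spec_normalize_sentence sentence category subcategory action out) := by unfold Spec_normalize_sentence; infer_instance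

-- ===== CLAIM (what is proved, stated in full; the proofs are below) =====
def Claim_equal_normalize_sentence : Prop := ∀ (sentence : String) (category : Option String) (subcategory : Option String) (action : Option String), Dom_normalize_sentence sentence category subcategory action → Spec_normalize_sentence sentence category subcategory action (normalize_sentence sentence category subcategory action)

-- ===== LEMMAS AND PROOFS =====

-- the intent component of B's fold is A's intent fold
theorem pv_fold_fst (nd nl : Bool) (doc : List String) (st : String × String × Bool × String × Bool) :
    (doc.foldl (pvStep nd nl) st).1 =
      doc.foldl (fun intent token =>
        if (["turn", "activate", "play", "stop", "adjust"] : List String).contains token then "command"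
        else if (["check", "query", "status"] : List String).contains token then "query"
        else intent) st.1 := by
  induction doc generalizing st with
  | nil => rfl
  | cons t ts ih => simpa [List.foldl_cons, pvStep] using ih (pvStep nd nl st t)

-- the device component of B's fold: first match when needed and not yet found, else unchanged
theorem pv_fold_dev (nd nl : Bool) (doc : List String) (st : String × String × Bool × String × Bool) :
    (doc.foldl (pvStep nd nl) st).2.1 =
      if nd && !st.2.2.1 then pvScanFirst pv_devices doc st.2.1 else st.2.1 := by
  induction doc generalizing st with
  | nil => simp [pvScanFirst]
  | cons t ts ih =>
      rw [List.foldl_cons, ih]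
      by_cases hm : t ∈ pv_devices <;>
        by_cases hnd : nd = true <;> by_cases hdf : st.2.2.1 = true <;>
        simp [pvStep, pvScanFirst, hm, hnd, hdf]

-- the location component of B's fold
theorem pv_fold_loc (nd nl : Bool) (doc : List String) (st : String × String × Bool × String × Bool) :
    (doc.foldl (pvStep nd nl) st).2.2.2.1 =
      if nl && !st.2.2.2.2 then pvScanFirst pv_locations doc st.2.2.2.1 else st.2.2.2.1 := by
  induction doc generalizing st with
  | nil => simp [pvScanFirst]
  | cons t ts ih =>
      rw [List.foldl_cons, ih]
      by_cases hm : t ∈ pv_locations <;>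
        by_cases hnl : nl = true <;> by_cases hlf : st.2.2.2.2 = true <;>
        simp [pvStep, pvScanFirst, hm, hnl, hlf]

-- ===== VERDICT (by name: the statement is the Claim_ definition above) =====
theorem normalize_sentence_spec : Claim_equal_normalize_sentence := by
  intro sentence category subcategory action _
  unfold Spec_normalize_sentence normalize_sentence normalize_sentence_alt
  simp only [pv_fold_fst, pv_fold_dev, pv_fold_loc]
  simp [pv_intent_map, PySem.Dict.empty]
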